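-- pv_equiv track=rewrite | github.com/jebreimo/Argen | clapgen/properties.py | minmaxCount
-- ===== SOURCE A (Python) =====
-- def minmaxCount(counts):
--     mi, ma = 0, 0
--     for c in counts:
--         if c[1] == -1:
--             ma = -1
--         elif ma != -1:
--             ma = max(c[1], ma)
--         mi = min(c[0], mi)
--     return mi, ma
-- ===== SOURCE B (Python) =====
-- def minmaxCount(counts):
--     # Divide and conquer; -1 dominates because the key (x == -1, x) makes it the
--     # top element of the max order, so no sticky flag or separate existence check.
--     key = lambda x: (x == -1, x)
--     if not counts:
--         return (0, 0)
--     if len(counts) == 1: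
--         a, b = counts[0]
--         return (min(a, 0), max(b, 0, key=key))
--     h = len(counts) // 2
--     lmi, lma = minmaxCount(counts[:h])
--     rmi, rma = minmaxCount(counts[h:])
--     return (min(lmi, rmi), max(lma, rma, key=key))
-- ===== Notes on version B (the rewrite author's own statement) =====
-- stated objective: alternative
-- what changed: Replaces A's single left-to-right loop with a sticky -1 flag by a divide-and-conquer recursion that splits the list in half and merges, handling -1 not by branching but by an order embedding: max is taken under the key (x == -1, x), which makes -1 the top element.
import Mathlib
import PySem

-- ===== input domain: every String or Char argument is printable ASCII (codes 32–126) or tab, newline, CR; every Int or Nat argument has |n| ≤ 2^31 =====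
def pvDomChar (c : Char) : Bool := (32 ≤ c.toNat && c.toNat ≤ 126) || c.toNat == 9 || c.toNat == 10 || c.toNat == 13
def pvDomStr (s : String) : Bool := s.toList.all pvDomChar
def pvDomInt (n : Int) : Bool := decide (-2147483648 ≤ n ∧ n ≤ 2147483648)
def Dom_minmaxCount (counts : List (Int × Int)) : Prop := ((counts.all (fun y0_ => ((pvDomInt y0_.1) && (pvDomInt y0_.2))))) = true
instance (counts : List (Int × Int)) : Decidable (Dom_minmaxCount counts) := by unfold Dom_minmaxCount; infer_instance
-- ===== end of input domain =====

-- B replaces A's fused sticky-flag loop by divide-and-conquer with a key-based max (objective: alternative).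
-- ===== PORT A =====
def minmaxCount (counts : List (Int × Int)) : Int × Int :=
  counts.foldl (fun (s : Int × Int) c =>
    let ma := if c.2 = -1 then -1 else if s.2 ≠ -1 then max c.2 s.2 else s.2
    (min c.1 s.1, ma)) (0, 0)

-- ===== PORT B =====
-- Python's tuple key (x == -1, x), lexicographic < on (bool, int) with False < True.
def pvKey (x : Int) : Bool × Int := (x == -1, x)
def pvTupLt (a b : Bool × Int) : Bool := (!a.1 && b.1) || (a.1 == b.1 && decide (a.2 < b.2))
-- Python max(x, y, key=key): first argument wins ties.
def pvMaxK (x y : Int) : Int := if pvTupLt (pvKey x) (pvKey y) then y else x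

def minmaxCount_alt (counts : List (Int × Int)) : Int × Int :=
  match counts with
  | [] => (0, 0)
  | [c] => (min c.1 0, pvMaxK c.2 0)
  | c1 :: c2 :: rest =>
    let cs := c1 :: c2 :: rest
    let h : Nat := cs.length / 2
    let l := minmaxCount_alt (cs.take h)
    let r := minmaxCount_alt (cs.drop h)
    (min l.1 r.1, pvMaxK l.2 r.2)
  termination_by counts.length
  decreasing_by
    · simp; omega
    · simp; omega

-- ===== PRECONDITION & SPEC =====
def Spec_minmaxCount (counts : List (Int × Int)) (out : Int × Int) : Prop := out = minmaxCount_alt counts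
instance (counts : List (Int × Int)) (out : Int × Int) : Decidable (Spec_minmaxCount counts out) := by unfold Spec_minmaxCount; infer_instance

-- ===== CLAIM (what is proved, stated in full; the proofs are below) =====
def Claim_equal_minmaxCount : Prop := ∀ (counts : List (Int × Int)), Dom_minmaxCount counts → Spec_minmaxCount counts (minmaxCount counts)

-- ===== LEMMAS AND PROOFS =====

-- closed forms both programs are reduced to
def pvMi (l : List (Int × Int)) : Int := (l.map Prod.fst).foldl min 0
def pvMa (l : List (Int × Int)) : Int :=
  if l.any (fun c => c.2 == -1) then -1 else (l.map Prod.snd).foldl max 0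

theorem foldl_min_shift (l : List Int) (a b : Int) :
    l.foldl min (min a b) = min a (l.foldl min b) := by
  induction l generalizing b with
  | nil => rfl
  | cons x t ih => simpa [min_assoc] using ih (min b x)

theorem foldl_max_shift (l : List Int) (a b : Int) :
    l.foldl max (max a b) = max a (l.foldl max b) := by
  induction l generalizing b with
  | nil => rfl
  | cons x t ih => simpa [max_assoc] using ih (max b x)

theorem pvMi_le (l : List (Int × Int)) : pvMi l ≤ 0 := by
  unfold pvMi
  have : ∀ (m : List Int) (s : Int), m.foldl min s ≤ s := by
    intro m; induction m with
    | nil => intro s; simp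
    | cons x t ih => intro s; exact le_trans (ih (min s x)) (min_le_left _ _)
  exact this _ 0

theorem pvMa_nonneg (l : List (Int × Int)) :
    l.any (fun c => c.2 == -1) = false → 0 ≤ pvMa l := by
  intro h
  unfold pvMa
  rw [h]
  simp only [Bool.false_eq_true, if_false]
  have : ∀ (m : List Int) (s : Int), s ≤ m.foldl max s := by
    intro m; induction m with
    | nil => intro s; simp
    | cons x t ih => intro s; exact le_trans (le_max_left _ _) (ih (max s x))
  exact this _ 0

theorem pvMi_append (l1 l2 : List (Int × Int)) :
    pvMi (l1 ++ l2) = min (pvMi l1) (pvMi l2) := by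
  unfold pvMi
  rw [List.map_append, List.foldl_append]
  have h0 : (l1.map Prod.fst).foldl min 0 = min ((l1.map Prod.fst).foldl min 0) 0 :=
    (min_eq_left (pvMi_le l1)).symm
  conv_lhs => rw [h0]
  rw [foldl_min_shift]

theorem pvMa_eq_neg (l : List (Int × Int)) (h : l.any (fun c => c.2 == -1) = true) :
    pvMa l = -1 := by simp [pvMa, h]

theorem pvMa_eq_fold (l : List (Int × Int)) (h : l.any (fun c => c.2 == -1) = false) :
    pvMa l = (l.map Prod.snd).foldl max 0 := by simp [pvMa, h]

theorem pvMa_append (l1 l2 : List (Int × Int)) :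
    pvMa (l1 ++ l2) = pvMaxK (pvMa l1) (pvMa l2) := by
  by_cases h1 : l1.any (fun c => c.2 == -1) = true <;>
  by_cases h2 : l2.any (fun c => c.2 == -1) = true
  · have hany : (l1 ++ l2).any (fun c => c.2 == -1) = true := by
      simp only [List.any_append, h1, Bool.true_or]
    rw [pvMa_eq_neg _ hany, pvMa_eq_neg _ h1, pvMa_eq_neg _ h2]
    simp [pvMaxK, pvTupLt, pvKey]
  · have h2' : l2.any (fun c => c.2 == -1) = false := eq_false_of_ne_true h2
    have hany : (l1 ++ l2).any (fun c => c.2 == -1) = true := by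
      simp only [List.any_append, h1, Bool.true_or]
    have hge := pvMa_nonneg l2 h2'
    have hne : (pvMa l2 == -1) = false := by simp; omega
    rw [pvMa_eq_neg _ hany, pvMa_eq_neg _ h1]
    simp [pvMaxK, pvTupLt, pvKey, hne]
  · have h1' : l1.any (fun c => c.2 == -1) = false := eq_false_of_ne_true h1
    have hany : (l1 ++ l2).any (fun c => c.2 == -1) = true := by
      simp only [List.any_append, h2, Bool.or_true]
    have hge := pvMa_nonneg l1 h1'
    have hne : (pvMa l1 == -1) = false := by simp; omega
    rw [pvMa_eq_neg _ hany, pvMa_eq_neg _ h2]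
    simp [pvMaxK, pvTupLt, pvKey, hne]
  · have h1' : l1.any (fun c => c.2 == -1) = false := eq_false_of_ne_true h1
    have h2' : l2.any (fun c => c.2 == -1) = false := eq_false_of_ne_true h2
    have hany : (l1 ++ l2).any (fun c => c.2 == -1) = false := by
      simp only [List.any_append, h1', h2', Bool.or_self]
    have g1 := pvMa_nonneg l1 h1'
    have g2 := pvMa_nonneg l2 h2'
    have hne1 : (pvMa l1 == -1) = false := by simp; omega
    have hne2 : (pvMa l2 == -1) = false := by simp; omega
    rw [pvMa_eq_fold _ hany, pvMa_eq_fold _ h1', pvMa_eq_fold _ h2']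
    rw [pvMa_eq_fold _ h1'] at hne1 g1
    rw [pvMa_eq_fold _ h2'] at hne2 g2
    rw [List.map_append, List.foldl_append]
    have h0 : (l1.map Prod.snd).foldl max 0 = max ((l1.map Prod.snd).foldl max 0) 0 :=
      (max_eq_left g1).symm
    conv_lhs => rw [h0]
    rw [foldl_max_shift]
    simp only [pvMaxK, pvKey, hne1, hne2]
    by_cases hlt : (l1.map Prod.snd).foldl max 0 < (l2.map Prod.snd).foldl max 0
    · rw [if_pos (by simp [pvTupLt, hlt]), max_eq_right (le_of_lt hlt)]
    · rw [if_neg (by simp [pvTupLt, hlt]), max_eq_left (le_of_not_gt hlt)]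

theorem alt_eq_aux (n : Nat) : ∀ (l : List (Int × Int)), l.length ≤ n →
    minmaxCount_alt l = (pvMi l, pvMa l) := by
  induction n with
  | zero =>
    intro l hl
    have : l = [] := List.length_eq_zero_iff.mp (Nat.le_zero.mp hl)
    subst this
    simp [minmaxCount_alt, pvMi, pvMa]
  | succ n ih =>
    intro l hl
    match l with
    | [] => simp [minmaxCount_alt, pvMi, pvMa]
    | [c] =>
      rw [minmaxCount_alt]
      refine Prod.ext ?_ ?_
      · simp [pvMi, min_comm]
      · by_cases h : c.2 = -1
        · simp [pvMa, pvMaxK, pvTupLt, pvKey, h]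
        · have hb : (c.2 == -1) = false := beq_eq_false_iff_ne.mpr h
          by_cases hlt : c.2 < 0
          · rw [show pvMaxK c.2 0 = 0 from by
              unfold pvMaxK; rw [if_pos (by simp [pvTupLt, pvKey, hb, hlt])]]
            simp [pvMa, hb, max_eq_left (le_of_lt hlt)]
          · rw [show pvMaxK c.2 0 = c.2 from by
              unfold pvMaxK; rw [if_neg (by simp [pvTupLt, pvKey, hb, hlt])]]
            simp [pvMa, hb, max_eq_right (le_of_not_gt hlt)]
    | c1 :: c2 :: rest =>
      rw [minmaxCount_alt]
      have hlen : (c1 :: c2 :: rest).length = rest.length + 2 := by simp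
      have htk : ((c1 :: c2 :: rest).take ((c1 :: c2 :: rest).length / 2)).length ≤ n := by
        simp only [List.length_take, hlen] at *
        omega
      have hdp : ((c1 :: c2 :: rest).drop ((c1 :: c2 :: rest).length / 2)).length ≤ n := by
        simp only [List.length_drop, hlen] at *
        omega
      rw [ih _ htk, ih _ hdp]
      have hsplit : (c1 :: c2 :: rest) =
          (c1 :: c2 :: rest).take ((c1 :: c2 :: rest).length / 2) ++
          (c1 :: c2 :: rest).drop ((c1 :: c2 :: rest).length / 2) := by simp
      refine Prod.ext ?_ ?_
      · conv_rhs => rw [hsplit]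
        rw [pvMi_append]
      · conv_rhs => rw [hsplit]
        rw [pvMa_append]

theorem alt_eq (l : List (Int × Int)) : minmaxCount_alt l = (pvMi l, pvMa l) :=
  alt_eq_aux l.length l le_rfl

theorem minmaxCount_loop (counts : List (Int × Int)) (mi ma : Int) :
    counts.foldl (fun (s : Int × Int) c =>
      let ma := if c.2 = -1 then -1 else if s.2 ≠ -1 then max c.2 s.2 else s.2
      (min c.1 s.1, ma)) (mi, ma)
    = ((counts.map Prod.fst).foldl min mi,
       if ma = -1 ∨ counts.any (fun c => c.2 == -1) then -1
       else (counts.map Prod.snd).foldl max ma) := by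
  induction counts generalizing mi ma with
  | nil => simp
  | cons c cs ih =>
    simp only [List.foldl_cons, List.map_cons, List.any_cons, ih]
    refine Prod.ext (by rw [min_comm]) ?_
    by_cases h1 : c.2 = -1
    · simp [h1]
    · by_cases h2 : ma = -1
      · simp [h1, h2]
      · have hmx : ¬ max c.2 ma = -1 := by
          have := le_max_left c.2 ma; have := le_max_right c.2 ma; omega
        rw [if_neg h1, if_pos h2]
        simp only [hmx, h2, false_or]
        rw [max_comm c.2 ma]
        have h1' : (c.2 == -1) = false := beq_eq_false_iff_ne.mpr h1
        rw [h1', Bool.false_or]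

-- ===== VERDICT (by name: the statement is the Claim_ definition above) =====
theorem minmaxCount_spec : Claim_equal_minmaxCount := by
  intro counts _
  unfold Spec_minmaxCount minmaxCount
  rw [minmaxCount_loop, alt_eq]
  refine Prod.ext rfl ?_
  by_cases h : counts.any (fun c => c.2 == -1) = true
  · rw [pvMa_eq_neg _ h]; simp [h]
  · have h' : counts.any (fun c => c.2 == -1) = false := eq_false_of_ne_true h
    rw [pvMa_eq_fold _ h']
    simp [h']
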